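-- pv_equiv track=rewrite | github.com/jbandu/airline-scheduling | backend/app/agents/schedule_validation/validators/aircraft_validator.py | _group_by_aircraft
-- ===== SOURCE A (Python) =====
-- from typing import List, Dict, Any
--
-- def _group_by_aircraft(
--     flights: List[Dict[str, Any]]
-- ) -> Dict[str, List[Dict[str, Any]]]:
--     """Group flights by aircraft registration"""
--     grouped = {}
--     for flight in flights:
--         reg = flight.get("aircraft_registration")
--         if reg:
--             if reg not in grouped:
--                 grouped[reg] = []
--             grouped[reg].append(flight)
--     return grouped
-- ===== SOURCE B (Python) =====
-- from typing import List, Dict, Any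
--
-- def _group_by_aircraft(
--     flights: List[Dict[str, Any]]
-- ) -> Dict[str, List[Dict[str, Any]]]:
--     """Group flights by aircraft registration (key discovery + per-key filter)."""
--     regs = dict.fromkeys(
--         r for f in flights if (r := f.get("aircraft_registration"))
--     )
--     return {
--         r: [f for f in flights if f.get("aircraft_registration") == r]
--         for r in regs
--     }
-- ===== Notes on version B (the rewrite author's own statement) =====
-- stated objective: alternative
-- what changed: Replaces the single-pass hash-bucket accumulation with a two-phase decomposition: first collect the distinct truthy registrations in order of first occurrence (dict.fromkeys), then build each group by filtering the whole flight list per registration.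
import Mathlib
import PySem

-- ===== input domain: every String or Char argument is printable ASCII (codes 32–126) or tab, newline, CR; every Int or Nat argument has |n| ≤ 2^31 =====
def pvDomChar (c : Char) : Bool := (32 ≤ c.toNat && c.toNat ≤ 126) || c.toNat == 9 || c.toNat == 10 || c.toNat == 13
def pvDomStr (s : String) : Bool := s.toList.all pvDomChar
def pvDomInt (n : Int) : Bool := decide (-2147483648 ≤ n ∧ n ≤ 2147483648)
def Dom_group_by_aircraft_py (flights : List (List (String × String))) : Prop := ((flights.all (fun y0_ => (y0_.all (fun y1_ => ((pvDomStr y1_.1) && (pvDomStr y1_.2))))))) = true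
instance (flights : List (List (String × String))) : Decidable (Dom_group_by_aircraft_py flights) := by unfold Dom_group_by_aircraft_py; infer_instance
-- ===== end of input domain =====

-- B replaces A's one-pass hash-bucket accumulation by a two-phase decomposition (collect the
-- distinct truthy registrations in first-occurrence order, then build each group by filtering
-- the whole list per registration); objective: alternative, not faster.

-- shared helper: flight.get("aircraft_registration") (first-match lookup on the association list)
def pvReg (f : List (String × String)) : Option String :=
  (PySem.Dict.mk f).get? "aircraft_registration"

-- ===== PORT A =====
def group_by_aircraft_py (flights : List (List (String × String))) : List (String × List (List (String × String))) :=
  (flights.foldl (fun grouped flight =>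
      match pvReg flight with
      | some r =>
          if r ≠ "" then
            (if grouped.contains r then grouped else grouped.insert r []).modify r [] (· ++ [flight])
          else grouped
      | none => grouped)
    PySem.Dict.empty).items

-- ===== PORT B =====
def group_by_aircraft_py_alt (flights : List (List (String × String))) : List (String × List (List (String × String))) :=
  let regs := PySem.List.dedup (flights.filterMap (fun f =>
      match pvReg f with
      | some r => if r ≠ "" then some r else none
      | none => none))
  regs.map (fun r => (r, flights.filter (fun f => pvReg f == some r)))

-- ===== PRECONDITION & SPEC =====
def Spec_group_by_aircraft_py (flights : List (List (String × String))) (out : List (String × List (List (String × String)))) : Prop := out = group_by_aircraft_py_alt flights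
instance (flights : List (List (String × String))) (out : List (String × List (List (String × String)))) : Decidable (Spec_group_by_aircraft_py flights out) := by unfold Spec_group_by_aircraft_py; infer_instance

-- ===== CLAIM (what is proved, stated in full; the proofs are below) =====
def Claim_equal_group_by_aircraft_py : Prop := ∀ (flights : List (List (String × String))), Dom_group_by_aircraft_py flights → Spec_group_by_aircraft_py flights (group_by_aircraft_py flights)

-- ===== LEMMAS AND PROOFS =====

-- the truthiness test 'if reg:' and the value of the key on truthy flights
def pvTruthy (f : List (String × String)) : Bool :=
  match pvReg f with
  | some r => !(r == "")
  | none => false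

def pvRegV (f : List (String × String)) : String := (pvReg f).getD ""

-- inserting an absent key with value [] and then appending is the same as modify with default []
theorem pv_insert_modify {V : Type} (d : PySem.Dict String (List V)) (r : String) (f : V)
    (h : d.contains r = false) :
    (d.insert r []).modify r [] (· ++ [f]) = d.modify r [] (· ++ [f]) := by
  have hmem : ∀ p ∈ d.items, p.1 ≠ r := by
    intro p hp hpr
    have : d.contains r = true := by
      rw [PySem.Dict.contains_iff_mem_keys]
      exact hpr ▸ PySem.Dict.mem_keys_of_mem_items d hp
    simp [this] at h
  have hins : (d.insert r []) = PySem.Dict.mk (d.items ++ [(r, [])]) := by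
    apply PySem.Dict.ext
    exact PySem.Dict.items_insert_of_not_contains d ([] : List V) h
  have hget : (d.insert r []).getD r [] = [] := by
    rw [← PySem.Dict.setdefault_of_not_contains d ([] : List V) h,
      PySem.Dict.getD_setdefault_self, PySem.Dict.getD_of_not_contains d _ h]
  simp only [PySem.Dict.modify, PySem.Dict.insert, h, Bool.false_eq_true, ↓reduceIte,
    PySem.Dict.contains_mk, List.any_append, List.any_cons, BEq.rfl, List.any_nil,
    Bool.or_false, Bool.or_true, beq_iff_eq, List.map_append, List.map_cons, List.map_nil,
    PySem.Dict.mk.injEq, List.append_singleton_inj, Prod.mk.injEq, List.append_cancel_right_eq,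
    true_and]
  constructor
  · conv_rhs => rw [← List.map_id d.items]
    exact List.map_congr_left (fun p hp => by simp [hmem p hp])
  · rw [← hins, hget, PySem.Dict.getD_of_not_contains d _ h]

-- A's loop body, simplified to a single modify guarded by truthiness
theorem pv_step_eq (grouped : PySem.Dict String (List (List (String × String))))
    (flight : List (String × String)) :
    (match pvReg flight with
      | some r =>
          if r ≠ "" then
            (if grouped.contains r then grouped else grouped.insert r []).modify r [] (· ++ [flight])
          else grouped
      | none => grouped)
    = if pvTruthy flight then grouped.modify (pvRegV flight) [] (· ++ [flight]) else grouped := by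
  unfold pvTruthy pvRegV
  cases hr : pvReg flight with
  | none => simp
  | some r =>
    by_cases hre : r = ""
    · simp [hre]
    · simp only [hre, ne_eq, not_false_iff, if_true, Bool.not_eq_eq_eq_not,
        Bool.not_true, Option.getD_some]
      cases hc : grouped.contains r with
      | true => simp [hre]
      | false => simp [hre, pv_insert_modify grouped r flight hc]

-- the flights' extracted truthy registrations, in order
theorem pv_filterMap_eq (flights : List (List (String × String))) :
    flights.filterMap (fun f =>
        match pvReg f with
        | some r => if r ≠ "" then some r else none
        | none => none)
      = (flights.filter pvTruthy).map pvRegV := by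
  induction flights with
  | nil => rfl
  | cons f rest ih =>
    simp only [List.filterMap_cons, List.filter_cons]
    cases hr : pvReg f with
    | none => simpa [pvTruthy, hr] using ih
    | some r =>
      by_cases hre : r = ""
      · simpa [pvTruthy, hr, hre] using ih
      · simp only [ne_eq, ite_not] at ih ⊢
        simp [pvTruthy, pvRegV, hr, hre, ih]

-- per-key filter over the truthy sublist = per-key filter over the whole list, for truthy keys
theorem pv_filter_eq (flights : List (List (String × String))) (k : String) (hk : k ≠ "") :
    (flights.filter pvTruthy).filter (fun f => pvRegV f == k)
      = flights.filter (fun f => pvReg f == some k) := by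
  rw [List.filter_filter]
  apply List.filter_congr
  intro f _
  unfold pvTruthy pvRegV
  cases hr : pvReg f with
  | none => simp
  | some r =>
    by_cases hrk : r = k
    · simp [hrk, hk]
    · simp [hrk]

-- ===== VERDICT (by name: the statement is the Claim_ definition above) =====
theorem group_by_aircraft_py_spec : Claim_equal_group_by_aircraft_py := by
  intro flights _
  unfold Spec_group_by_aircraft_py group_by_aircraft_py group_by_aircraft_py_alt
  -- reduce A's loop to a modify-fold over the truthy flights
  have hbody : (fun (grouped : PySem.Dict String (List (List (String × String)))) flight =>
      (match pvReg flight with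
        | some r =>
            if r ≠ "" then
              (if grouped.contains r then grouped else grouped.insert r []).modify r [] (· ++ [flight])
            else grouped
        | none => grouped))
      = fun grouped flight =>
          if pvTruthy flight = true then grouped.modify (pvRegV flight) [] (· ++ [flight]) else grouped := by
    funext grouped flight
    simpa using pv_step_eq grouped flight
  rw [hbody, PySem.List.foldl_if_eq_foldl_filter]
  set tl := flights.filter pvTruthy with htl
  set D := tl.foldl (fun d f => d.modify (pvRegV f) [] (· ++ [f])) PySem.Dict.empty with hD
  have hnodup : D.keys.Nodup := by
    rw [hD]
    exact PySem.Dict.nodup_keys_foldl_modify_key tl pvRegV [] (fun _ f => (· ++ [f])) _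
      PySem.Dict.nodup_keys_empty
  have hkeys : D.keys = PySem.Set.ofList (tl.map pvRegV) := by
    rw [hD, PySem.Dict.keys_foldl_modify_key tl pvRegV [] (fun _ f => (· ++ [f]))]
    rw [PySem.Dict.keys_empty, PySem.Set.update_eq_append_filter]
    simp [PySem.Set.contains]
  have hgetD : ∀ k, D.getD k [] = tl.filter (fun f => pvRegV f == k) := by
    intro k
    have hmapfold : tl.foldl (fun d f => d.modify (pvRegV f) [] (· ++ [f])) PySem.Dict.empty
        = (tl.map (fun f => (pvRegV f, f))).foldl
            (fun d p => d.modify p.1 [] (· ++ [p.2])) PySem.Dict.empty := by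
      rw [List.foldl_map]
    rw [hD, hmapfold, PySem.Dict.getD_foldl_modify_append]
    simp [List.filter_map, Function.comp_def]
  rw [PySem.Dict.items_eq_map_keys D hnodup [], hkeys, pv_filterMap_eq, PySem.List.dedup_eq_ofList]
  apply List.map_congr_left
  intro k hkmem
  have hk : k ≠ "" := by
    have : k ∈ tl.map pvRegV := (PySem.Set.mem_ofList _ _).mp hkmem
    obtain ⟨f, hf, hfk⟩ := List.mem_map.mp this
    have htr : pvTruthy f = true := (List.mem_filter.mp hf).2
    unfold pvTruthy at htr
    unfold pvRegV at hfk
    cases hr : pvReg f with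
    | none => rw [hr] at htr; simp at htr
    | some r =>
      rw [hr] at htr hfk
      simp at htr hfk
      exact hfk ▸ htr
  rw [hgetD k, pv_filter_eq flights k hk]
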